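-- pv_equiv track=rewrite | github.com/Jo0ker64/CDA | MiniApp/Procedurale/fonction_jeux/ramiGraphique.py | est_suite
-- ===== SOURCE A (Python) =====
-- def est_suite(cartes):
--     valeurs = sorted([carte[0] for carte in cartes if carte[0] != 14])
--     couleurs = [carte[1] for carte in cartes if carte[0] != 14]
--     nombre_jokers = len([carte for carte in cartes if carte[0] == 14])
--
--     # Toutes les cartes doivent être de la même couleur, ou être compensées par des jokers
--     if len(set(couleurs)) != 1 and nombre_jokers < len(cartes) - 1:
--         return False
--
--     if len(valeurs) + nombre_jokers < 3:
--         return False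
--
--     # Vérifie la séquence des valeurs avec les jokers
--     for i in range(len(valeurs) - 1):
--         difference = valeurs[i + 1] - valeurs[i]
--         if difference > 1 + nombre_jokers:
--             return False
--         nombre_jokers -= max(0, difference - 1)
--
--     return True
-- ===== SOURCE B (Python) =====
-- def est_suite(cartes):
--     valeurs = [v for v, _ in cartes if v != 14]
--     nombre_jokers = len(cartes) - len(valeurs)
--     couleurs = {c for v, c in cartes if v != 14}
--
--     if len(couleurs) != 1 and nombre_jokers < len(cartes) - 1:
--         return False
--     if len(cartes) < 3:
--         return False
--     if len(valeurs) < 2: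
--         return True
--     return (max(valeurs) - min(valeurs)) - (len(set(valeurs)) - 1) <= nombre_jokers
-- ===== Notes on version B (the rewrite author's own statement) =====
-- stated objective: alternative
-- what changed: Replaced A's sort of the non-joker values followed by a stateful adjacent-gap scan that decrements the joker count with a closed-form arithmetic test: the run is valid iff (max-min) - (distinct_count-1) jokers suffice, computed from min, max and a set of the values without sorting.
import Mathlib
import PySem

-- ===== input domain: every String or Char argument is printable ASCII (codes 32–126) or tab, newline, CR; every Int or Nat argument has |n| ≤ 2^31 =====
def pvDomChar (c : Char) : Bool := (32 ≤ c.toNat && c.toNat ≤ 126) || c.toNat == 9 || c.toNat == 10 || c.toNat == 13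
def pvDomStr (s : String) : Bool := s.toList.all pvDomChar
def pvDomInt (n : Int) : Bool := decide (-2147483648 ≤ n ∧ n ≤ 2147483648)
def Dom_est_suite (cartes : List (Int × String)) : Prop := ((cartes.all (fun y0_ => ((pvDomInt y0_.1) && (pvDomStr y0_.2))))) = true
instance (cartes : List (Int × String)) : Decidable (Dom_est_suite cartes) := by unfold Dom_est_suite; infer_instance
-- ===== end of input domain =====

-- B replaces A's sort-and-scan joker check by a one-pass min/max/distinct-count arithmetic test (alternative decomposition).

-- ===== PORT A =====
-- the for-loop over adjacent pairs of the sorted values, with early return and a mutable joker count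
def pvLoopA : List Int → Int → Bool
  | v1 :: v2 :: rest, j =>
    let d := v2 - v1
    if d > 1 + j then false
    else pvLoopA (v2 :: rest) (j - max 0 (d - 1))
  | _, _ => true

def est_suite (cartes : List (Int × String)) : Bool :=
  let valeurs := PySem.List.sorted ((cartes.filter (fun c => decide (c.1 ≠ 14))).map Prod.fst) (fun x => x) false
  let couleurs := (cartes.filter (fun c => decide (c.1 ≠ 14))).map Prod.snd
  let nombre_jokers : Int := ((cartes.filter (fun c => decide (c.1 = 14))).length : Int)
  if (PySem.Set.ofList couleurs).length ≠ 1 ∧ nombre_jokers < (cartes.length : Int) - 1 then false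
  else if (valeurs.length : Int) + nombre_jokers < 3 then false
  else pvLoopA valeurs nombre_jokers

-- ===== PORT B =====
def est_suite_alt (cartes : List (Int × String)) : Bool :=
  let valeurs := (cartes.filter (fun c => decide (c.1 ≠ 14))).map Prod.fst
  let nombre_jokers : Int := (cartes.length : Int) - (valeurs.length : Int)
  let couleurs := PySem.Set.ofList ((cartes.filter (fun c => decide (c.1 ≠ 14))).map Prod.snd)
  if couleurs.length ≠ 1 ∧ nombre_jokers < (cartes.length : Int) - 1 then false
  else if cartes.length < 3 then false
  else if valeurs.length < 2 then true
  else decide (((PySem.List.max? valeurs (fun x => x)).getD 0 - (PySem.List.min? valeurs (fun x => x)).getD 0)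
                - (((PySem.Set.ofList valeurs).length : Int) - 1) ≤ nombre_jokers)

-- ===== PRECONDITION & SPEC =====
def Spec_est_suite (cartes : List (Int × String)) (out : Bool) : Prop := out = est_suite_alt cartes
instance (cartes : List (Int × String)) (out : Bool) : Decidable (Spec_est_suite cartes out) := by unfold Spec_est_suite; infer_instance

-- ===== CLAIM (what is proved, stated in full; the proofs are below) =====
def Claim_equal_est_suite : Prop := ∀ (cartes : List (Int × String)), Dom_est_suite cartes → Spec_est_suite cartes (est_suite cartes)

-- ===== LEMMAS AND PROOFS =====

-- total number of jokers A's loop needs: sum over adjacent gaps of max 0 (gap-1)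
def pvNeed : List Int → Int
  | v1 :: v2 :: rest => max 0 (v2 - v1 - 1) + pvNeed (v2 :: rest)
  | _ => 0

-- last element of a :: t
def pvLast : Int → List Int → Int
  | a, [] => a
  | _, b :: r => pvLast b r

theorem pvNeed_nonneg (l : List Int) : 0 ≤ pvNeed l := by
  induction l with
  | nil => simp [pvNeed]
  | cons a t ih =>
    cases t with
    | nil => simp [pvNeed]
    | cons b r =>
      simp only [pvNeed] at ih ⊢
      have h1 : (0:Int) ≤ max 0 (b - a - 1) := le_max_left _ _
      omega

theorem pvLoopA_eq (v1 v2 : Int) (rest : List Int) :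
    ∀ j : Int, 0 ≤ j → pvLoopA (v1 :: v2 :: rest) j = decide (pvNeed (v1 :: v2 :: rest) ≤ j) := by
  induction rest generalizing v1 v2 with
  | nil =>
    intro j hj
    simp only [pvLoopA, pvNeed]
    split_ifs with h <;> simp <;> omega
  | cons v3 r ih =>
    intro j hj
    have h0 := pvNeed_nonneg (v2 :: v3 :: r)
    have step : pvLoopA (v1 :: v2 :: v3 :: r) j
        = if v2 - v1 > 1 + j then false
          else pvLoopA (v2 :: v3 :: r) (j - max 0 (v2 - v1 - 1)) := rfl
    rw [step]
    split_ifs with h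
    · have hx : ¬ pvNeed (v1 :: v2 :: v3 :: r) ≤ j := by
        have h1 : (0:Int) ≤ max 0 (v2 - v1 - 1) := le_max_left _ _
        simp only [pvNeed]
        simp only [pvNeed] at h0
        omega
      simp [hx]
    · rw [ih _ _ _ (by omega)]
      simp only [decide_eq_decide, pvNeed]
      omega

theorem pvLast_mem (a : Int) (t : List Int) : pvLast a t ∈ a :: t := by
  induction t generalizing a with
  | nil => simp [pvLast]
  | cons b r ih =>
    simp only [pvLast]
    exact List.mem_cons_of_mem a (ih b)

theorem pvLast_max (a : Int) (t : List Int) (hp : (a :: t).Pairwise (· ≤ ·)) :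
    ∀ z ∈ a :: t, z ≤ pvLast a t := by
  induction t generalizing a with
  | nil => intro z hz; simp at hz; simp [pvLast, hz]
  | cons b r ih =>
    intro z hz
    have hall : ∀ y ∈ b :: r, a ≤ y := (List.pairwise_cons.mp hp).1
    have hp' : (b :: r).Pairwise (· ≤ ·) := (List.pairwise_cons.mp hp).2
    simp only [pvLast]
    rcases List.mem_cons.mp hz with hz | hz
    · subst hz
      exact le_trans (hall _ (pvLast_mem b r)) (le_refl _)
    · exact ih b hp' z hz

theorem pvNeed_sorted (a : Int) (t : List Int) (hp : (a :: t).Pairwise (· ≤ ·)) :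
    pvNeed (a :: t) = pvLast a t - a - (((a :: t).toFinset.card : Int) - 1) := by
  induction t generalizing a with
  | nil => simp [pvNeed, pvLast]
  | cons b r ih =>
    have hab : a ≤ b := (List.pairwise_cons.mp hp).1 b (by simp)
    have hall : ∀ y ∈ b :: r, a ≤ y := (List.pairwise_cons.mp hp).1
    have hp' : (b :: r).Pairwise (· ≤ ·) := (List.pairwise_cons.mp hp).2
    have hrec := ih b hp'
    have hlast : pvLast a (b :: r) = pvLast b r := rfl
    by_cases hab2 : a = b
    · subst hab2
      have hins : (a :: a :: r).toFinset = (a :: r).toFinset := by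
        simp [List.toFinset_cons]
      have hmax : max 0 (a - a - 1) = 0 := by omega
      calc pvNeed (a :: a :: r) = max 0 (a - a - 1) + pvNeed (a :: r) := rfl
        _ = pvNeed (a :: r) := by omega
        _ = pvLast a r - a - (((a :: r).toFinset.card : Int) - 1) := hrec
        _ = pvLast a (a :: r) - a - (((a :: a :: r).toFinset.card : Int) - 1) := by
              rw [hins, hlast]
    · have halt : a < b := lt_of_le_of_ne hab hab2
      have hnotmem : a ∉ (b :: r).toFinset := by
        simp only [List.mem_toFinset]
        intro hmem
        rcases List.mem_cons.mp hmem with h' | h'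
        · exact hab2 h'
        · have := (List.pairwise_cons.mp hp').1 a h'
          omega
      have hins : (a :: b :: r).toFinset.card = (b :: r).toFinset.card + 1 := by
        rw [List.toFinset_cons, Finset.card_insert_of_notMem (by simpa using hnotmem)]
      have hmax : max 0 (b - a - 1) = b - a - 1 := by omega
      calc pvNeed (a :: b :: r) = max 0 (b - a - 1) + pvNeed (b :: r) := rfl
        _ = (b - a - 1) + (pvLast b r - b - (((b :: r).toFinset.card : Int) - 1)) := by
              rw [hmax, hrec]
        _ = pvLast a (b :: r) - a - (((a :: b :: r).toFinset.card : Int) - 1) := by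
              rw [hlast, hins]; push_cast; ring

theorem pvSet_len (xs : List Int) : ((PySem.Set.ofList xs).length : Int) = (xs.toFinset.card : Int) := by
  have hnd : (PySem.Set.ofList xs).Nodup := PySem.Set.nodup_ofList xs
  have hfs : (PySem.Set.ofList xs).toFinset = xs.toFinset := by
    ext y; simp [List.mem_toFinset, PySem.Set.mem_ofList]
  rw [← List.toFinset_card_of_nodup hnd, hfs]

theorem pvFilterLen (cartes : List (Int × String)) :
    (cartes.filter (fun c => decide (c.1 ≠ 14))).length
      + (cartes.filter (fun c => decide (c.1 = 14))).length = cartes.length := by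
  induction cartes with
  | nil => simp
  | cons c t ih =>
    rw [List.filter_cons, List.filter_cons]
    by_cases h : c.1 = 14
    · rw [if_neg (by simp [h]), if_pos (by simp [h])]
      simp only [List.length_cons]
      omega
    · rw [if_pos (by simp [h]), if_neg (by simp [h])]
      simp only [List.length_cons]
      omega

theorem est_suite_eq (cartes : List (Int × String)) :
    est_suite cartes = est_suite_alt cartes := by
  simp only [est_suite, est_suite_alt]
  have hcount := pvFilterLen cartes
  set vB := (cartes.filter (fun c => decide (c.1 ≠ 14))).map Prod.fst with hvB
  have hvlen : vB.length = (cartes.filter (fun c => decide (c.1 ≠ 14))).length := List.length_map ..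
  have hnj : ((cartes.filter (fun c => decide (c.1 = 14))).length : Int)
      = (cartes.length : Int) - (vB.length : Int) := by omega
  rw [hnj]
  generalize hs : PySem.List.sorted vB (fun x => x) false = s
  have hperm : s.Perm vB := hs ▸ PySem.List.sorted_perm _ _ _
  have hpw : s.Pairwise (fun x1 x2 => x1 ≤ x2) := hs ▸ PySem.List.sorted_pairwise vB (fun x => x)
  have hslen : s.length = vB.length := hperm.length_eq
  by_cases h1 : (PySem.Set.ofList ((cartes.filter (fun c => decide (c.1 ≠ 14))).map Prod.snd)).length ≠ 1
      ∧ (cartes.length : Int) - (vB.length : Int) < (cartes.length : Int) - 1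
  · rw [if_pos h1, if_pos h1]
  · rw [if_neg h1, if_neg h1]
    by_cases h2 : (cartes.length : Int) < 3
    · rw [if_pos (by omega), if_pos (by omega : cartes.length < 3)]
    · rw [if_neg (by omega), if_neg (by omega : ¬ cartes.length < 3)]
      have hjnn : (0:Int) ≤ (cartes.length : Int) - (vB.length : Int) := by omega
      by_cases h3 : vB.length < 2
      · rw [if_pos h3]
        rcases s with _ | ⟨x, _ | ⟨y, r⟩⟩
        · rfl
        · rfl
        · simp only [List.length_cons] at hslen; omega
      · rw [if_neg h3]
        rcases s with _ | ⟨x, _ | ⟨y, r⟩⟩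
        · simp only [List.length_nil] at hslen; omega
        · simp only [List.length_cons, List.length_nil] at hslen; omega
        · rw [pvLoopA_eq _ _ _ _ hjnn, pvNeed_sorted x (y :: r) hpw]
          have hmemx : x ∈ vB := hperm.mem_iff.mp (by simp)
          have hxmin : ∀ z ∈ vB, x ≤ z := by
            intro z hz
            exact PySem.List.key_head_sorted_le (xs := vB) (key := fun x => x) hs z hz
          have hne : vB ≠ [] := by
            intro h
            apply h3
            rw [h]
            simp
          obtain ⟨m, hm'⟩ : ∃ m, PySem.List.min? vB (fun x => x) = some m := by
            cases hmin : PySem.List.min? vB (fun x => x) with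
            | none => exact absurd ((PySem.List.min?_eq_none_iff _ _).mp hmin) hne
            | some m => exact ⟨m, rfl⟩
          obtain ⟨M, hM'⟩ : ∃ M, PySem.List.max? vB (fun x => x) = some M := by
            cases hmax : PySem.List.max? vB (fun x => x) with
            | none => exact absurd ((PySem.List.max?_eq_none_iff _ _).mp hmax) hne
            | some M => exact ⟨M, rfl⟩
          have hmmem : m ∈ vB := PySem.List.min?_mem hm'
          have hmmin : ∀ z ∈ vB, m ≤ z := PySem.List.min?_isMin hm'
          have hMmem : M ∈ vB := PySem.List.max?_mem hM'
          have hMmax : ∀ z ∈ vB, z ≤ M := PySem.List.max?_isMax hM'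
          have hxm : x = m := le_antisymm (hxmin m hmmem) (hmmin x hmemx)
          have hlastmem : pvLast x (y :: r) ∈ vB :=
            hperm.mem_iff.mp (pvLast_mem x (y :: r))
          have hlM : pvLast x (y :: r) = M :=
            le_antisymm (hMmax _ hlastmem) (pvLast_max x (y :: r) hpw M (hperm.mem_iff.mpr hMmem))
          have hfs : (x :: y :: r).toFinset = vB.toFinset := by
            ext z
            simp only [List.mem_toFinset]
            exact hperm.mem_iff
          have hfin : ((x :: y :: r).toFinset.card : Int) = ((PySem.Set.ofList vB).length : Int) := by
            rw [pvSet_len, hfs]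
          rw [hm', hM', hlM, ← hxm, hfin]
          simp

-- ===== VERDICT (by name: the statement is the Claim_ definition above) =====
theorem est_suite_spec : Claim_equal_est_suite := by
  intro cartes _
  unfold Spec_est_suite
  exact est_suite_eq cartes
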